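-- pv_equiv track=rewrite | github.com/vivek-shrikhande/easy-mql | easymql/actions.py | action
-- ===== SOURCE A (Python) =====
-- def action(tokens):
--     return {
--         '$'
--         + ''.join(
--             [
--                 part.capitalize() if i else part
--                 for i, part in enumerate(tokens[0].lower().split('_'))
--             ]
--         ): tokens[-1]
--     }
-- ===== SOURCE B (Python) =====
-- def action(tokens):
--     key_chars = []
--     cap = False
--     for ch in tokens[0].lower():
--         if ch == '_':
--             cap = True
--         else:
--             key_chars.append(ch.upper() if cap else ch)
--             cap = False
--     return {'$' + ''.join(key_chars): tokens[-1]}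
-- ===== Notes on version B (the rewrite author's own statement) =====
-- stated objective: alternative
-- what changed: B builds the camelCase key in one character-level pass with a capitalize-next flag instead of split('_')/capitalize/join over a list of parts.
import Mathlib
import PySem

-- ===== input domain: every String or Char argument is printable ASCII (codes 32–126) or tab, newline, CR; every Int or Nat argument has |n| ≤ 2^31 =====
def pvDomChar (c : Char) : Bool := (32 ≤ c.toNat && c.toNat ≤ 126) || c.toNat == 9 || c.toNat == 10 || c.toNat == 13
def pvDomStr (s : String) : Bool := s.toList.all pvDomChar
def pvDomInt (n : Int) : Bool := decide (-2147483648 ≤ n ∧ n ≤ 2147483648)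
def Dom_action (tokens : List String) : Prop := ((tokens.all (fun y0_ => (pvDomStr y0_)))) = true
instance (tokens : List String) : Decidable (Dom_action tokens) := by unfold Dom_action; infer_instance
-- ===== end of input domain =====

-- B replaces A's split('_')/capitalize/join construction of the camelCase key with a single
-- character pass carrying a capitalize-next flag (objective: alternative decomposition).

-- ===== PORT A =====
-- part.capitalize(): upper-case the first char, lower-case the rest (exact for ASCII).
def capitalizeChars (cs : List Char) : List Char :=
  match cs with
  | [] => []
  | c :: rest => PySem.Chars.upperChar c :: PySem.Chars.lower rest

def action (tokens : List String) : List (String × String) :=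
  let t0 := PySem.List.pyGetD tokens 0 ""        -- tokens[0] (Pre_: tokens ≠ [])
  let key := String.mk ('$' ::
    PySem.Chars.join []
      ((PySem.List.enumerate (PySem.Chars.splitOn (PySem.Chars.lower t0.toList) ['_']) 0).map
        (fun ip => if ip.1 ≠ 0 then capitalizeChars ip.2 else ip.2)))
  [(key, PySem.List.pyGetD tokens (-1) "")]      -- tokens[-1]

-- ===== PORT B =====
def action_alt (tokens : List String) : List (String × String) :=
  let t0 := PySem.List.pyGetD tokens 0 ""        -- tokens[0] (Pre_: tokens ≠ [])
  let st := (PySem.Chars.lower t0.toList).foldl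
    (fun (st : List Char × Bool) ch =>
      if ch = '_' then (st.1, true)
      else (st.1 ++ [if st.2 then PySem.Chars.upperChar ch else ch], false))
    ([], false)
  [(String.mk ('$' :: st.1), PySem.List.pyGetD tokens (-1) "")]

-- ===== PRECONDITION & SPEC =====
-- Pre_ excludes only the empty list, on which A raises IndexError (tokens[0]).
def Pre_action (tokens : List String) : Prop := tokens ≠ []
instance (tokens : List String) : Decidable (Pre_action tokens) := by unfold Pre_action; infer_instance
def pvWitness_action : List String := ["foo_bar", "x"]
def Spec_action (tokens : List String) (out : List (String × String)) : Prop := out = action_alt tokens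
instance (tokens : List String) (out : List (String × String)) : Decidable (Spec_action tokens out) := by unfold Spec_action; infer_instance

-- ===== CLAIM (what is proved, stated in full; the proofs are below) =====
def Claim_equal_action : Prop := ∀ (tokens : List String), Dom_action tokens → Pre_action tokens → Spec_action tokens (action tokens)

-- ===== LEMMAS AND PROOFS =====

theorem char_le_toNat (a b : Char) : (a ≤ b) ↔ a.toNat ≤ b.toNat := by
  rw [Char.le_def, UInt32.le_iff_toNat_le]; rfl

theorem lowerChar_idem (c : Char) : PySem.Chars.lowerChar (PySem.Chars.lowerChar c) = PySem.Chars.lowerChar c := by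
  simp only [PySem.Chars.lowerChar, PySem.Chars.isupper]
  split_ifs with h1 h2 <;> try rfl
  exfalso
  simp only [char_le_toNat, decide_eq_true_eq, Bool.and_eq_true] at h1 h2
  have hA : ('A':Char).toNat = 65 := rfl
  have hZ : ('Z':Char).toNat = 90 := rfl
  rw [hA, hZ] at h1 h2
  have hv : (Char.ofNat (c.toNat + 32)).toNat = c.toNat + 32 := by
    rw [Char.toNat_ofNat, if_pos]
    constructor
    omega
  omega

theorem lower_fixed (cs : List Char) :
    ∀ c ∈ PySem.Chars.lower cs, PySem.Chars.lowerChar c = c := by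
  intro c hc
  simp only [PySem.Chars.lower, List.mem_map] at hc
  obtain ⟨d, _, rfl⟩ := hc
  exact lowerChar_idem d

-- a structural single-char split on '_'
def mySplit : List Char → List (List Char)
  | [] => [[]]
  | c :: r =>
    if c = '_' then [] :: mySplit r
    else
      match mySplit r with
      | [] => [[c]]
      | p :: ps => (c :: p) :: ps

theorem mySplit_ne_nil (l : List Char) : mySplit l ≠ [] := by
  cases l with
  | nil => simp [mySplit]
  | cons c r =>
    simp only [mySplit]
    split_ifs
    · simp
    · cases h : mySplit r <;> simp

theorem mySplit_mem (l : List Char) : ∀ p ∈ mySplit l, ∀ c ∈ p, c ∈ l := by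
  induction l with
  | nil =>
    intro p hp c hc
    simp [mySplit] at hp
    simp [hp] at hc
  | cons a r ih =>
    intro p hp c hc
    simp only [mySplit] at hp
    split_ifs at hp with ha
    · rcases List.mem_cons.mp hp with h | h
      · simp [h] at hc
      · exact List.mem_cons_of_mem _ (ih p h c hc)
    · cases hr : mySplit r with
      | nil => exact absurd hr (mySplit_ne_nil r)
      | cons q qs =>
        rw [hr] at hp
        rcases List.mem_cons.mp hp with h | h
        · subst h
          rcases List.mem_cons.mp hc with h | h
          · exact h ▸ List.mem_cons_self
          · exact List.mem_cons_of_mem _ (ih q (hr ▸ List.mem_cons_self) c h)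
        · exact List.mem_cons_of_mem _ (ih p (hr ▸ List.mem_cons_of_mem _ h) c hc)

-- Chars.splitOn with separator ['_'] computes mySplit
theorem go_spec (fuel : Nat) (l cur : List Char) (acc : List (List Char)) (h : l.length < fuel) :
    PySem.Chars.splitOn.go ['_'] fuel l cur acc =
      acc.reverse ++ (cur.reverse ++ (mySplit l).headI) :: (mySplit l).tail := by
  induction fuel generalizing l cur acc with
  | zero => omega
  | succ fuel ih =>
    cases l with
    | nil => simp [PySem.Chars.splitOn.go, mySplit]
    | cons c rest =>
      rw [PySem.Chars.splitOn.go]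
      by_cases hc : c = '_'
      · subst hc
        rw [if_pos (by simp [List.isPrefixOf])]
        have h2 := ih rest [] (cur.reverse :: acc) (by simp at h ⊢; omega)
        simp only [List.length_cons, List.length_nil, List.drop_succ_cons, List.drop_zero] at h2 ⊢
        rw [h2]
        simp only [mySplit]
        cases hr : mySplit rest with
        | nil => exact absurd hr (mySplit_ne_nil rest)
        | cons p ps => simp
      · rw [if_neg (by simp [List.isPrefixOf]; exact fun h' => hc h'.symm)]
        rw [ih rest (c :: cur) acc (by simp at h ⊢; omega)]
        simp only [mySplit, if_neg hc]
        cases hr : mySplit rest with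
        | nil => exact absurd hr (mySplit_ne_nil rest)
        | cons p ps => simp

theorem splitOn_eq_mySplit (l : List Char) :
    PySem.Chars.splitOn l ['_'] = mySplit l := by
  rw [PySem.Chars.splitOn, go_spec (l.length + 1) l [] [] (by omega)]
  cases hr : mySplit l with
  | nil => exact absurd hr (mySplit_ne_nil l)
  | cons p ps => simp

theorem join_nil_cons (p : List Char) (ps : List (List Char)) :
    PySem.Chars.join [] (p :: ps) = p ++ PySem.Chars.join [] ps := by
  cases ps with
  | nil => simp [PySem.Chars.join, List.intercalate]
  | cons q qs => simp [PySem.Chars.join, List.intercalate]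

-- indices ≥ 1 are all truthy: the enumerate-map collapses to plain map capitalize
theorem enum_map_cap (ps : List (List Char)) (s : Int) (hs : 1 ≤ s) :
    (PySem.List.enumerate ps s).map
        (fun ip => if ip.1 ≠ 0 then capitalizeChars ip.2 else ip.2) =
      ps.map capitalizeChars := by
  induction ps generalizing s with
  | nil => simp [PySem.List.enumerate]
  | cons p ps ih =>
    rw [PySem.List.enumerate_cons]
    simp only [List.map_cons]
    rw [if_pos (by omega), ih (s + 1) (by omega)]

-- B's flag pass, structurally
def camel : Bool → List Char → List Char
  | _, [] => []
  | cap, c :: r =>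
    if c = '_' then camel true r
    else (if cap then PySem.Chars.upperChar c else c) :: camel false r

theorem lower_fixed_of_sub (l p : List Char) (hl : ∀ c ∈ l, PySem.Chars.lowerChar c = c)
    (hp : ∀ c ∈ p, c ∈ l) : PySem.Chars.lower p = p := by
  simp only [PySem.Chars.lower]
  have hmap : List.map PySem.Chars.lowerChar p = List.map id p :=
    List.map_congr_left (fun c hc => hl c (hp c hc))
  simpa using hmap

-- the split/capitalize/join result equals the flag pass (on lower-fixed input)
theorem split_join_eq_camel (l : List Char) (hl : ∀ c ∈ l, PySem.Chars.lowerChar c = c) :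
    ((mySplit l).headI ++ PySem.Chars.join [] ((mySplit l).tail.map capitalizeChars)
        = camel false l) ∧
    (PySem.Chars.join [] ((mySplit l).map capitalizeChars) = camel true l) := by
  induction l with
  | nil => simp [mySplit, camel, capitalizeChars, PySem.Chars.join, List.intercalate]
  | cons c r ih =>
    have hr : ∀ d ∈ r, PySem.Chars.lowerChar d = d :=
      fun d hd => hl d (List.mem_cons_of_mem _ hd)
    obtain ⟨ih1, ih2⟩ := ih hr
    by_cases hc : c = '_'
    · subst hc
      have hsp : mySplit ('_' :: r) = [] :: mySplit r := by simp [mySplit]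
      refine ⟨?_, ?_⟩
      · rw [hsp]
        have hcml : camel false ('_' :: r) = camel true r := by simp [camel]
        rw [hcml]
        simpa using ih2
      · rw [hsp, List.map_cons, join_nil_cons]
        have hcml : camel true ('_' :: r) = camel true r := by simp [camel]
        rw [hcml]
        simpa [capitalizeChars] using ih2
    · cases hmr : mySplit r with
      | nil => exact absurd hmr (mySplit_ne_nil r)
      | cons p ps =>
        have hsplit : mySplit (c :: r) = (c :: p) :: ps := by
          simp [mySplit, if_neg hc, hmr]
        have hlowp : PySem.Chars.lower p = p :=
          lower_fixed_of_sub r p hr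
            (fun d hd => mySplit_mem r p (hmr ▸ List.mem_cons_self) d hd)
        rw [hmr] at ih1
        simp only [List.headI, List.tail_cons] at ih1
        refine ⟨?_, ?_⟩
        · rw [hsplit]
          have hcml : camel false (c :: r) = c :: camel false r := by simp [camel, hc]
          rw [hcml]
          simp [ih1]
        · rw [hsplit, List.map_cons, join_nil_cons]
          have hcml : camel true (c :: r) = PySem.Chars.upperChar c :: camel false r := by
            simp [camel, hc]
          rw [hcml]
          simp [capitalizeChars, hlowp, ih1]

-- B's foldl computes camel
theorem foldl_camel (l : List Char) (acc : List Char) (cap : Bool) :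
    (l.foldl
      (fun (st : List Char × Bool) ch =>
        if ch = '_' then (st.1, true)
        else (st.1 ++ [if st.2 then PySem.Chars.upperChar ch else ch], false))
      (acc, cap)).1 = acc ++ camel cap l := by
  induction l generalizing acc cap with
  | nil => simp [camel]
  | cons c r ih =>
    simp only [List.foldl_cons]
    by_cases hc : c = '_'
    · subst hc
      rw [if_pos rfl, ih, camel]
      simp
    · rw [if_neg hc, ih, camel, if_neg hc]
      simp

-- the assembled keys agree
theorem key_eq (cs : List Char) :
    PySem.Chars.join []
      ((PySem.List.enumerate (PySem.Chars.splitOn (PySem.Chars.lower cs) ['_']) 0).map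
        (fun ip => if ip.1 ≠ 0 then capitalizeChars ip.2 else ip.2)) =
    ((PySem.Chars.lower cs).foldl
      (fun (st : List Char × Bool) ch =>
        if ch = '_' then (st.1, true)
        else (st.1 ++ [if st.2 then PySem.Chars.upperChar ch else ch], false))
      ([], false)).1 := by
  rw [splitOn_eq_mySplit, foldl_camel]
  have hl := lower_fixed cs
  obtain ⟨h1, _⟩ := split_join_eq_camel (PySem.Chars.lower cs) hl
  cases hmr : mySplit (PySem.Chars.lower cs) with
  | nil => exact absurd hmr (mySplit_ne_nil _)
  | cons p ps =>
    rw [PySem.List.enumerate_cons, List.map_cons]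
    simp only [if_neg (by simp : ¬ ((0:Int) ≠ 0))]
    rw [show (0:Int)+1 = 1 from rfl, enum_map_cap ps 1 le_rfl, join_nil_cons]
    rw [hmr] at h1
    simpa using h1

-- ===== VERDICT (by name: the statement is the Claim_ definition above) =====
theorem action_spec : Claim_equal_action := by
  intro tokens _hdom _hpre
  unfold Spec_action action action_alt
  simp only []
  rw [key_eq]
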